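-- pv_equiv track=rewrite | github.com/CaineleJoe/Python | Lab3/Laborator3.py | getPalindroms
-- ===== SOURCE A (Python) =====
-- def isPalindrom(x):
--     return str(x) == str(x)[::-1]
--
-- def getPalindroms(list):
--     palindroms = 0
--     max_palindrom = -9999
--     for i in list:
--         if isPalindrom(i):
--             palindroms = palindroms + 1
--             if i > max_palindrom:
--                 max_palindrom = i
--     return (palindroms, max_palindrom)
-- ===== SOURCE B (Python) =====
-- def getPalindroms(list):
--     # Sort first: in ascending order the LAST palindrome seen is automatically
--     # the maximum, so no comparison against a running max is needed.
--     count = 0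
--     best = -9999
--     for i in sorted(list):
--         if str(i) == str(i)[::-1]:
--             count += 1
--             best = i  # overwrite: sortedness makes the final write the max
--     return (count, best)
-- ===== Notes on version B (the rewrite author's own statement) =====
-- stated objective: alternative
-- what changed: B sorts the list first and exploits the order: palindromes simply overwrite the result slot (the last one written is the maximum by sortedness), eliminating A's running-max comparison; correctness rests on the proved facts that the palindrome count is permutation-invariant and the last palindrome of a sorted list is the max of the palindromes.
import Mathlib
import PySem

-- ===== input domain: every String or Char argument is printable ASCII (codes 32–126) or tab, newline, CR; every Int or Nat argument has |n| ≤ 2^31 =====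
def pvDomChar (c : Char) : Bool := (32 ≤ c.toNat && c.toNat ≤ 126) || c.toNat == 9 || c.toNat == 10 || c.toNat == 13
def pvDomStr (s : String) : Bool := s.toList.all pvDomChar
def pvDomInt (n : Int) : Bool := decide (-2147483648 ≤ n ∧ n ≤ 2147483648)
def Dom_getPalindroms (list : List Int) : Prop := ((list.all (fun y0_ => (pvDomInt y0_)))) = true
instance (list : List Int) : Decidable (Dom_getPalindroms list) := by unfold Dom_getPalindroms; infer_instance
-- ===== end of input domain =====

-- B sorts the list first so that palindromes overwrite the result slot positionally
-- (the last written is the max), replacing A's running-max comparison scan.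


-- ===== PORT A =====
-- str(x) == str(x)[::-1]; the [::-1] slice of a whole string is exactly List.reverse
def isPalindrom (x : Int) : Bool :=
  PySem.Int.toChars x == (PySem.Int.toChars x).reverse

def getPalindroms (list : List Int) : Int × Int :=
  list.foldl
    (fun (st : Int × Int) i =>
      if isPalindrom i then
        (st.1 + 1, if i > st.2 then i else st.2)
      else st)
    ((0 : Int), (-9999 : Int))

-- ===== PORT B =====
-- loop over sorted(list); palindromes overwrite best with no comparison
def getPalindroms_alt (list : List Int) : Int × Int :=
  (PySem.List.sorted list (fun x => x) false).foldl
    (fun (st : Int × Int) i =>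
      if PySem.Int.toChars i == (PySem.Int.toChars i).reverse then
        (st.1 + 1, i)
      else st)
    ((0 : Int), (-9999 : Int))

-- ===== PRECONDITION & SPEC =====
def Spec_getPalindroms (list : List Int) (out : Int × Int) : Prop := out = getPalindroms_alt list
instance (list : List Int) (out : Int × Int) : Decidable (Spec_getPalindroms list out) := by unfold Spec_getPalindroms; infer_instance

-- ===== CLAIM (what is proved, stated in full; the proofs are below) =====
def Claim_equal_getPalindroms : Prop := ∀ (list : List Int), Dom_getPalindroms list → Spec_getPalindroms list (getPalindroms list)

-- ===== LEMMAS AND PROOFS =====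

-- a negative integer's str starts with '-' and ends with a digit, so it is never a palindrome
theorem isPalindrom_nonneg (x : Int) (h : isPalindrom x = true) : 0 ≤ x := by
  by_contra hneg
  push Not at hneg
  have hx : PySem.Int.toChars x = '-' :: Nat.toDigits 10 x.natAbs := by
    simp [PySem.Int.toChars, hneg]
  simp only [isPalindrom, beq_iff_eq, hx, List.reverse_cons] at h
  have hd : Nat.toDigits 10 x.natAbs ≠ [] := by
    have := @Nat.length_toDigits_pos 10 x.natAbs
    intro he; simp [he] at this
  obtain ⟨c, t, hct⟩ := List.exists_cons_of_ne_nil (List.reverse_ne_nil_iff.mpr hd)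
  have hhead : some '-' = some c := by
    have := congrArg List.head? h
    simpa [hct] using this
  have hc : c ∈ Nat.toDigits 10 x.natAbs := by
    have : c ∈ (Nat.toDigits 10 x.natAbs).reverse := by simp [hct]
    simpa using this
  have := Nat.isDigit_of_mem_toDigits (by norm_num) (by norm_num) hc
  simp at hhead
  rw [← hhead] at this
  simp [Char.isDigit] at this

-- A's loop from state (c, m): count added to c, running max = fold of max over the filter
theorem foldA_split (l : List Int) : ∀ (c m : Int),
    l.foldl
      (fun (st : Int × Int) i =>
        if isPalindrom i then (st.1 + 1, if i > st.2 then i else st.2) else st)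
      (c, m)
    = (c + ((l.filter (fun i => isPalindrom i)).length : Int),
       (l.filter (fun i => isPalindrom i)).foldl max m) := by
  induction l with
  | nil => intro c m; simp
  | cons x t ih =>
    intro c m
    by_cases hx : isPalindrom x = true
    · have hmax : (if x > m then x else m) = max m x := by
        rcases Int.lt_or_le m x with h | h
        · simp [h, max_eq_right (Int.le_of_lt h)]
        · simp [Int.not_lt.mpr h, max_eq_left h]
      simp only [List.foldl_cons, List.filter_cons, hx, if_pos, hmax, ih]
      refine Prod.ext ?_ rfl
      simp only [List.length_cons]
      push_cast
      ring
    · simp only [List.foldl_cons, List.filter_cons, hx]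
      simpa using ih c m

-- B's loop from state (c, m): count added to c, best = last palindrome (or m if none)
theorem foldB_split (l : List Int) : ∀ (c m : Int),
    l.foldl
      (fun (st : Int × Int) i =>
        if PySem.Int.toChars i == (PySem.Int.toChars i).reverse then (st.1 + 1, i) else st)
      (c, m)
    = (c + ((l.filter (fun i => isPalindrom i)).length : Int),
       (l.filter (fun i => isPalindrom i)).getLastD m) := by
  induction l with
  | nil => intro c m; simp
  | cons x t ih =>
    intro c m
    by_cases hx : isPalindrom x = true
    · have hx' : (PySem.Int.toChars x == (PySem.Int.toChars x).reverse) = true := hx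
      simp only [List.foldl_cons, List.filter_cons, hx, hx', if_pos, ih, List.getLastD_cons]
      refine Prod.ext ?_ rfl
      simp only [List.length_cons]
      push_cast
      ring
    · have hx' : (PySem.Int.toChars x == (PySem.Int.toChars x).reverse) = false := by
        simpa [isPalindrom] using hx
      simp only [List.foldl_cons, List.filter_cons, hx, hx']
      simpa using ih c m

-- fold of max over a ≤-sorted list whose elements dominate the seed is its last element
theorem foldl_max_sorted (t : List Int) : ∀ (x : Int), t.Pairwise (· ≤ ·) →
    (∀ y ∈ t, x ≤ y) → t.foldl max x = t.getLastD x := by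
  induction t with
  | nil => intro x _ _; rfl
  | cons y ts ih =>
    intro x hp hb
    have hxy : x ≤ y := hb y (by simp)
    have hp' := (List.pairwise_cons.mp hp)
    simp only [List.foldl_cons, max_eq_right hxy, List.getLastD_cons]
    exact ih y hp'.2 hp'.1

-- ===== VERDICT (by name: the statement is the Claim_ definition above) =====
theorem getPalindroms_spec : Claim_equal_getPalindroms := by
  intro list _
  unfold Spec_getPalindroms getPalindroms getPalindroms_alt
  rw [foldA_split, foldB_split]
  set s := PySem.List.sorted list (fun x => x) false with hs
  have hperm : (s.filter (fun i => isPalindrom i)).Perm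
      (list.filter (fun i => isPalindrom i)) :=
    (PySem.List.sorted_perm (xs := list) (key := fun x => x) (rev := false)).filter _
  have hlen : (list.filter (fun i => isPalindrom i)).length
      = (s.filter (fun i => isPalindrom i)).length := hperm.length_eq.symm
  have hfold : (list.filter (fun i => isPalindrom i)).foldl max (-9999 : Int)
      = (s.filter (fun i => isPalindrom i)).foldl max (-9999 : Int) :=
    (hperm.foldl_eq (-9999 : Int)).symm
  rw [hlen, hfold]
  have hsorted : (s.filter (fun i => isPalindrom i)).Pairwise (· ≤ ·) :=
    (PySem.List.sorted_pairwise (xs := list) (key := fun x => x)).filter _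
  cases hf : s.filter (fun i => isPalindrom i) with
  | nil => simp
  | cons x ft =>
    have hx0 : (0 : Int) ≤ x := by
      refine isPalindrom_nonneg x ?_
      have : x ∈ s.filter (fun i => isPalindrom i) := by simp [hf]
      exact (List.mem_filter.mp this).2
    rw [hf] at hsorted
    have hp' := List.pairwise_cons.mp hsorted
    simp only [List.foldl_cons, List.getLastD_cons]
    have hmx : max (-9999 : Int) x = x := max_eq_right (by omega)
    rw [hmx]
    exact congrArg (fun z => ((0 : Int) + ((x :: ft).length : Int), z)) (foldl_max_sorted ft x hp'.2 hp'.1)
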